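-- pv_equiv track=rewrite | github.com/g0khul/DSA-Bootcamp-Java | SolvedProblems/CPfor100Days/omit_extra_char.py | omit_extra_characters
-- ===== SOURCE A (Python) =====
-- def omit_extra_characters(s):
--     result = []
--     count = 0
--     for c in s:
--         if not result or c != result[-1]:
--             result.append(c)
--             count = 1
--         else:
--             count = count + 1
--             if count <= 2:
--                 result.append(c)
--
--     return ''.join(result)
-- ===== SOURCE B (Python) =====
-- from itertools import groupby
--
-- def omit_extra_characters(s):
--     return ''.join(c * min(2, sum(1 for _ in g)) for c, g in groupby(s))
-- ===== Notes on version B (the rewrite author's own statement) =====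
-- stated objective: idiomatic
-- what changed: Replaces the manual last-element/counter single-pass loop with an itertools.groupby decomposition: split the string into maximal runs of equal characters and emit each character min(2, run length) times.
import Mathlib
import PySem

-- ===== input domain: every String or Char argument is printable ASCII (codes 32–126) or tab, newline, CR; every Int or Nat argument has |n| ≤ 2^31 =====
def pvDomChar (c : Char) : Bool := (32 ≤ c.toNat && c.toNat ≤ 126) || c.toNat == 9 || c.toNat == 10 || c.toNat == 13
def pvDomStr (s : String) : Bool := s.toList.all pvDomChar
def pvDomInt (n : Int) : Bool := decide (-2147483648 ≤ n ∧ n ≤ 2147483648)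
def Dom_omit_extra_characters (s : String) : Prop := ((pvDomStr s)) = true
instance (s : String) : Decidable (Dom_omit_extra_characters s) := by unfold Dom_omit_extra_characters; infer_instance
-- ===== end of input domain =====

-- B replaces A's manual last-char/counter single-pass loop by a group-then-emit
-- decomposition (split into maximal runs, emit each char min(2, run length) times);
-- objective: more idiomatic, same cost.

-- ===== PORT A =====
-- one loop step of A: state = (result, count)
def Astep (st : List Char × Int) (c : Char) : List Char × Int :=
  if st.1 = [] ∨ some c ≠ PySem.List.pyGet? st.1 (-1) then
    (st.1 ++ [c], 1)
  else
    let count := st.2 + 1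
    if count ≤ 2 then (st.1 ++ [c], count) else (st.1, count)

def omit_extra_characters (s : String) : String :=
  String.mk (s.toList.foldl Astep ([], 0)).1

-- ===== PORT B =====
-- groupby(s): maximal runs of equal consecutive characters, as (char, run length)
def Bruns : List Char → List (Char × Nat)
  | [] => []
  | c :: rest =>
      (c, (rest.takeWhile (fun d => d == c)).length + 1) ::
        Bruns (rest.dropWhile (fun d => d == c))
  termination_by l => l.length
  decreasing_by
    have := List.length_dropWhile_le (fun d => d == c) rest
    simp; omega

def omit_extra_characters_alt (s : String) : String :=
  String.mk ((Bruns s.toList).flatMap (fun p => List.replicate (min 2 p.2) p.1))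

-- ===== PRECONDITION & SPEC =====
def Spec_omit_extra_characters (s : String) (out : String) : Prop := out = omit_extra_characters_alt s
instance (s : String) (out : String) : Decidable (Spec_omit_extra_characters s out) := by unfold Spec_omit_extra_characters; infer_instance

-- ===== CLAIM (what is proved, stated in full; the proofs are below) =====
def Claim_equal_omit_extra_characters : Prop := ∀ (s : String), Dom_omit_extra_characters s → Spec_omit_extra_characters s (omit_extra_characters s)

-- ===== LEMMAS AND PROOFS =====

-- folding a run of c with count already ≥ 2 changes nothing but the counter
lemma foldl_run2 (c : Char) : ∀ (m : Nat) (res : List Char) (cnt : Int),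
    2 ≤ cnt → res.getLast? = some c →
    List.foldl Astep (res, cnt) (List.replicate m c) = (res, cnt + m) := by
  intro m
  induction m with
  | zero => intro res cnt _ _; simp
  | succ m ih =>
      intro res cnt h2 hl
      have hne : res ≠ [] := by intro h; simp [h] at hl
      have hstep : Astep (res, cnt) c = (res, cnt + 1) := by
        simp [Astep, PySem.List.pyGet?_neg_one, hne, hl]
        omega
      rw [List.replicate_succ, List.foldl_cons, hstep, ih _ _ (by omega) hl]
      simp; omega

-- folding a run of c with count = 1 appends at most one more c
lemma foldl_run1 (c : Char) (m : Nat) (res : List Char)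
    (hl : res.getLast? = some c) :
    List.foldl Astep (res, 1) (List.replicate m c)
      = (res ++ List.replicate (min 1 m) c, (1 : Int) + m) := by
  cases m with
  | zero => simp
  | succ m =>
      have hne : res ≠ [] := by intro h; simp [h] at hl
      have hstep : Astep (res, 1) c = (res ++ [c], 2) := by
        simp [Astep, PySem.List.pyGet?_neg_one, hne, hl]
      have hl' : (res ++ [c]).getLast? = some c := by simp
      rw [List.replicate_succ, List.foldl_cons, hstep,
          foldl_run2 c m _ 2 (by omega) hl']
      simp; omega

lemma takeWhile_eq_replicate (c : Char) (l : List Char) :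
    l.takeWhile (fun d => d == c)
      = List.replicate (l.takeWhile (fun d => d == c)).length c := by
  rw [List.eq_replicate_iff]
  refine ⟨rfl, ?_⟩
  intro b hb
  have := List.mem_takeWhile_imp hb
  simpa using this

-- A's loop, started in any state whose last emitted char differs from the
-- head of the remaining input, appends exactly B's group-then-emit output.
lemma foldl_main : ∀ (n : Nat) (l res : List Char) (cnt : Int), l.length ≤ n →
    (∀ c, l.head? = some c → res.getLast? ≠ some c) →
    (List.foldl Astep (res, cnt) l).1
      = res ++ (Bruns l).flatMap (fun p => List.replicate (min 2 p.2) p.1) := by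
  intro n
  induction n with
  | zero =>
      intro l res cnt hlen _
      have : l = [] := List.length_eq_zero_iff.mp (by omega)
      simp [this, Bruns]
  | succ n ih =>
      intro l res cnt hlen hhd
      cases l with
      | nil => simp [Bruns]
      | cons c rest =>
          set t := rest.takeWhile (fun d => d == c) with ht
          set d := rest.dropWhile (fun d => d == c) with hd
          have hsplit : rest = t ++ d := (List.takeWhile_append_dropWhile).symm
          have hstep : Astep (res, cnt) c = (res ++ [c], 1) := by
            rcases eq_or_ne res [] with h | h
            · simp [Astep, h]
            · have := hhd c rfl
              have hget : PySem.List.pyGet? res (-1) = res.getLast? :=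
                PySem.List.pyGet?_neg_one res
              simp [Astep, h, hget]
              intro hc; exact absurd hc.symm this
          have hl' : (res ++ [c]).getLast? = some c := by simp
          have hrun := foldl_run1 c t.length (res ++ [c]) hl'
          have hdlen : d.length ≤ n := by
            have h1 : d.length ≤ rest.length := List.length_dropWhile_le _ rest
            simp at hlen; omega
          have hdhd : ∀ e, d.head? = some e →
              (res ++ [c] ++ List.replicate (min 1 t.length) c).getLast? ≠ some e := by
            intro e he
            have hne : ¬ (e == c) = true := by
              have := List.head?_dropWhile_not (fun d => d == c) rest
              rw [← hd] at this; rw [he] at this; simpa using this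
            have hec : e ≠ c := by simpa using hne
            have : (res ++ [c] ++ List.replicate (min 1 t.length) c).getLast? = some c := by
              cases Nat.eq_zero_or_pos t.length with
              | inl h0 => simp [h0]
              | inr hp =>
                  have : min 1 t.length = 1 := by omega
                  simp [this]
            rw [this]
            intro h; exact hec (by simpa using h.symm)
          calc (List.foldl Astep (res, cnt) (c :: rest)).1
              = (List.foldl Astep (res ++ [c], 1) (t ++ d)).1 := by
                rw [List.foldl_cons, hstep, hsplit]
            _ = (List.foldl Astep
                  (res ++ [c] ++ List.replicate (min 1 t.length) c, 1 + t.length) d).1 := by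
                have htr : t = List.replicate t.length c := by
                  rw [ht]; exact takeWhile_eq_replicate c rest
                rw [List.foldl_append]
                conv_lhs => rw [htr]
                rw [hrun]
            _ = res ++ [c] ++ List.replicate (min 1 t.length) c
                  ++ (Bruns d).flatMap (fun p => List.replicate (min 2 p.2) p.1) := by
                rw [ih d _ _ hdlen hdhd]
            _ = res ++ (Bruns (c :: rest)).flatMap
                  (fun p => List.replicate (min 2 p.2) p.1) := by
                rw [Bruns]
                have hmin : min 2 (t.length + 1) = min 1 t.length + 1 := by omega
                simp only [List.flatMap_cons, ← ht, ← hd, hmin, List.replicate_succ]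
                simp

-- ===== VERDICT (by name: the statement is the Claim_ definition above) =====
theorem omit_extra_characters_spec : Claim_equal_omit_extra_characters := by
  intro s _
  unfold Spec_omit_extra_characters omit_extra_characters omit_extra_characters_alt
  rw [foldl_main s.toList.length s.toList [] 0 le_rfl (by intro c _; simp)]
  simp
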